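-- pv_equiv track=rewrite | github.com/yoki-run/plugin-spotify | playback.py | detect_command
-- ===== SOURCE A (Python) =====
-- def detect_command(input_command, query):
--     if input_command in {"play", "pause", "next", "prev", "vol", "shuffle", "like", "unlike"}:
--         return input_command
--     low = (query or "").strip().lower()
--     for kw, name in [
--         ("pause", "pause"), ("stop", "pause"),
--         ("next", "next"), ("skip", "next"), ("n", "next"),
--         ("prev", "prev"), ("previous", "prev"), ("back", "prev"), ("p", "prev"),
--         ("vol", "vol"), ("volume", "vol"), ("v", "vol"),
--         ("shuffle", "shuffle"), ("sh", "shuffle"),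
--         ("unlike", "unlike"), ("unfav", "unlike"),
--         ("like", "like"), ("love", "like"), ("fav", "like"),
--         ("play", "play"),
--     ]:
--         if low == kw or low.startswith(kw + " "):
--             return name
--     return "play"
-- ===== SOURCE B (Python) =====
-- def _first_token(s):
--     tok = []
--     for ch in s:
--         if ch == ' ':
--             break
--         tok.append(ch)
--     return ''.join(tok)
--
--
-- def detect_command(input_command, query):
--     if input_command in {"play", "pause", "next", "prev", "vol", "shuffle", "like", "unlike"}:
--         return input_command
--     tok = _first_token((query or "").strip().lower())
--     if tok in ("pause", "stop"):
--         return "pause"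
--     if tok in ("next", "skip", "n"):
--         return "next"
--     if tok in ("prev", "previous", "back", "p"):
--         return "prev"
--     if tok in ("vol", "volume", "v"):
--         return "vol"
--     if tok in ("shuffle", "sh"):
--         return "shuffle"
--     if tok in ("unlike", "unfav"):
--         return "unlike"
--     if tok in ("like", "love", "fav"):
--         return "like"
--     return "play"
-- ===== Notes on version B (the rewrite author's own statement) =====
-- stated objective: simpler
-- what changed: A's ordered 20-entry prefix-matching scan (low == kw or low.startswith(kw + ' ') per pair) is replaced by extracting the first space-delimited token with one char loop that breaks at the first space, then classifying that token by synonym group; prefix matching disappears entirely.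
import Mathlib
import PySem

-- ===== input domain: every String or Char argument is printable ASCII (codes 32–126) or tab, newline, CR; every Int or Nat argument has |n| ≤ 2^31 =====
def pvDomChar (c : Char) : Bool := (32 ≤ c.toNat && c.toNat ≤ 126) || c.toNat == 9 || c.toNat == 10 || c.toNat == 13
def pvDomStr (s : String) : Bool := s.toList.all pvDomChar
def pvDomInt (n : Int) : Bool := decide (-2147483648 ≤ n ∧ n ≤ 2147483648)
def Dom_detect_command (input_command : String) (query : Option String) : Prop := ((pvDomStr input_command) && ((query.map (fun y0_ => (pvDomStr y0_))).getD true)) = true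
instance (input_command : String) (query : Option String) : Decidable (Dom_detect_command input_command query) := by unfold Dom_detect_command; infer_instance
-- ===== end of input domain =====

-- B replaces A's ordered prefix-matching scan over 20 (keyword, command) pairs by one
-- char loop extracting the first space-delimited token, then classifying that token by
-- synonym group (objective: simpler).

-- ===== PORT A =====
-- `query or ""` : falsy (None or "") becomes ""
def pyOrEmpty (q : Option String) : String :=
  match q with
  | none => ""
  | some s => if s == "" then "" else s

def kwScanList : List (String × String) :=
  [("pause", "pause"), ("stop", "pause"),
   ("next", "next"), ("skip", "next"), ("n", "next"),
   ("prev", "prev"), ("previous", "prev"), ("back", "prev"), ("p", "prev"),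
   ("vol", "vol"), ("volume", "vol"), ("v", "vol"),
   ("shuffle", "shuffle"), ("sh", "shuffle"),
   ("unlike", "unlike"), ("unfav", "unlike"),
   ("like", "like"), ("love", "like"), ("fav", "like"),
   ("play", "play")]

-- the for-loop with early return; falls through to "play"
def kwScan : List (String × String) → String → String
  | [], _ => "play"
  | (kw, name) :: rest, low =>
      if low == kw || PySem.Str.startswith low (kw ++ " ") then name else kwScan rest low

def detect_command (input_command : String) (query : Option String) : String :=
  if ["play", "pause", "next", "prev", "vol", "shuffle", "like", "unlike"].contains input_command then
    input_command
  else
    kwScan kwScanList (PySem.Str.lower (PySem.Str.strip (pyOrEmpty query)))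

-- ===== PORT B =====
-- _first_token: the for/break loop collecting chars up to the first space
def firstTok : List Char → List Char
  | [] => []
  | c :: rest => if c = ' ' then [] else c :: firstTok rest

-- the if-chain over synonym groups
def classify (tok : String) : String :=
  if ["pause", "stop"].contains tok then "pause"
  else if ["next", "skip", "n"].contains tok then "next"
  else if ["prev", "previous", "back", "p"].contains tok then "prev"
  else if ["vol", "volume", "v"].contains tok then "vol"
  else if ["shuffle", "sh"].contains tok then "shuffle"
  else if ["unlike", "unfav"].contains tok then "unlike"
  else if ["like", "love", "fav"].contains tok then "like"
  else "play"

def detect_command_alt (input_command : String) (query : Option String) : String :=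
  if ["play", "pause", "next", "prev", "vol", "shuffle", "like", "unlike"].contains input_command then
    input_command
  else
    classify (String.ofList (firstTok (PySem.Str.lower (PySem.Str.strip (query.getD ""))).toList))

-- ===== PRECONDITION & SPEC =====
def Spec_detect_command (input_command : String) (query : Option String) (out : String) : Prop := out = detect_command_alt input_command query
instance (input_command : String) (query : Option String) (out : String) : Decidable (Spec_detect_command input_command query out) := by unfold Spec_detect_command; infer_instance

-- ===== CLAIM (what is proved, stated in full; the proofs are below) =====
def Claim_equal_detect_command : Prop := ∀ (input_command : String) (query : Option String), Dom_detect_command input_command query → Spec_detect_command input_command query (detect_command input_command query)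

-- ===== LEMMAS AND PROOFS =====

-- B's char loop computes the prefix before the first space
lemma firstTok_eq (l : List Char) : firstTok l = l.takeWhile (· ≠ ' ') := by
  induction l with
  | nil => rfl
  | cons c rest ih =>
    by_cases hc : c = ' ' <;> simp [firstTok, hc, ih]

-- A's per-keyword test (low == kw or low startswith kw+" ") holds iff kw is exactly low's first token
lemma token_eq (kw low : List Char) (h : ∀ c ∈ kw, c ≠ ' ') :
    (low = kw ∨ (kw ++ [' ']) <+: low) ↔ low.takeWhile (· ≠ ' ') = kw := by
  induction kw generalizing low with
  | nil =>
    cases low with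
    | nil => simp
    | cons c rest =>
      constructor
      · rintro (h | h)
        · simp at h
        · obtain ⟨u, hu⟩ := h
          simp at hu
          simp [hu.1.symm]
      · intro htw
        by_cases hc : c = ' '
        · exact Or.inr ⟨rest, by simp [hc]⟩
        · simp [hc] at htw
  | cons k kw' ih =>
    have hk : k ≠ ' ' := h k (by simp)
    have h' : ∀ c ∈ kw', c ≠ ' ' := fun c hc => h c (by simp [hc])
    cases low with
    | nil =>
      simp only [List.takeWhile_nil]
      constructor
      · rintro (h | ⟨u, hu⟩) <;> simp_all
      · intro hh; exact absurd hh.symm (by simp)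
    | cons c rest =>
      by_cases hc : c = ' '
      · subst hc
        simp only [List.takeWhile_cons]
        rw [if_neg (by simp)]
        constructor
        · rintro (heq | ⟨u, hu⟩)
          · injection heq with h1 _
            exact absurd h1.symm hk
          · injection hu with h1 _
            exact absurd h1 hk
        · intro hh; exact absurd hh.symm (by simp)
      · simp only [List.takeWhile_cons]
        rw [if_pos (by simp [hc])]
        constructor
        · rintro (heq | ⟨u, hu⟩)
          · injection heq with h1 h2
            subst h1
            simpa using (ih rest h').mp (Or.inl h2)
          · injection hu with h1 h2
            subst h1
            simpa using (ih rest h').mp (Or.inr ⟨u, h2⟩)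
        · intro hh
          injection hh with h1 h2
          subst h1
          rcases (ih rest h').mpr h2 with h | h
          · exact Or.inl (by rw [h])
          · exact Or.inr (by obtain ⟨u, hu⟩ := h; exact ⟨u, by simp [← hu]⟩)

-- exact-match lookup of a token in an ordered pair list (proof-side characterisation of A's scan)
def lookupTok : List (String × String) → String → String
  | [], _ => "play"
  | (kw, name) :: rest, t => if kw == t then name else lookupTok rest t

-- A's ordered scan over space-free keywords = exact-match lookup at low's first token
lemma scan_eq_lookup (L : List (String × String)) (low : String)
    (h : ∀ p ∈ L, ∀ c ∈ p.1.toList, c ≠ ' ') :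
    kwScan L low = lookupTok L (String.ofList (low.toList.takeWhile (· ≠ ' '))) := by
  induction L with
  | nil => rfl
  | cons p rest ih =>
    obtain ⟨kw, name⟩ := p
    have hkw : ∀ c ∈ kw.toList, c ≠ ' ' := h (kw, name) (by simp)
    have hrest : ∀ p ∈ rest, ∀ c ∈ p.1.toList, c ≠ ' ' := fun p hp => h p (by simp [hp])
    have hcond : (low == kw || PySem.Str.startswith low (kw ++ " "))
        = (kw == String.ofList (low.toList.takeWhile (· ≠ ' '))) := by
      rw [Bool.eq_iff_iff]
      simp only [Bool.or_eq_true, beq_iff_eq, PySem.Str.startswith_eq,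
        PySem.Chars.startswith_iff, String.toList_append]
      rw [show (" " : String).toList = [' '] from rfl]
      constructor
      · intro hor
        have htw : low.toList.takeWhile (· ≠ ' ') = kw.toList := by
          refine (token_eq kw.toList low.toList hkw).mp ?_
          rcases hor with he | hp
          · exact Or.inl (by rw [he])
          · exact Or.inr hp
        rw [String.ext_iff, String.toList_ofList]
        exact htw.symm
      · intro hkweq
        have htw : low.toList.takeWhile (· ≠ ' ') = kw.toList := by
          rw [hkweq, String.toList_ofList]
        rcases (token_eq kw.toList low.toList hkw).mpr htw with hh | hh
        · exact Or.inl (String.ext_iff.mpr hh)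
        · exact Or.inr hh
    simp only [kwScan, lookupTok, hcond]
    split
    · rfl
    · exact ih hrest

-- exact-match lookup in A's table = B's group classification, for every token
lemma lookup_eq_classify (t : String) : lookupTok kwScanList t = classify t := by
  by_cases h0 : t = "pause"
  · subst h0; decide
  by_cases h1 : t = "stop"
  · subst h1; decide
  by_cases h2 : t = "next"
  · subst h2; decide
  by_cases h3 : t = "skip"
  · subst h3; decide
  by_cases h4 : t = "n"
  · subst h4; decide
  by_cases h5 : t = "prev"
  · subst h5; decide
  by_cases h6 : t = "previous"
  · subst h6; decide
  by_cases h7 : t = "back"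
  · subst h7; decide
  by_cases h8 : t = "p"
  · subst h8; decide
  by_cases h9 : t = "vol"
  · subst h9; decide
  by_cases h10 : t = "volume"
  · subst h10; decide
  by_cases h11 : t = "v"
  · subst h11; decide
  by_cases h12 : t = "shuffle"
  · subst h12; decide
  by_cases h13 : t = "sh"
  · subst h13; decide
  by_cases h14 : t = "unlike"
  · subst h14; decide
  by_cases h15 : t = "unfav"
  · subst h15; decide
  by_cases h16 : t = "like"
  · subst h16; decide
  by_cases h17 : t = "love"
  · subst h17; decide
  by_cases h18 : t = "fav"
  · subst h18; decide
  by_cases h19 : t = "play"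
  · subst h19; decide
  simp [lookupTok, kwScanList, classify, h0, Ne.symm h0, h1, Ne.symm h1, h2, Ne.symm h2, h3, Ne.symm h3, h4, Ne.symm h4, h5, Ne.symm h5, h6, Ne.symm h6, h7, Ne.symm h7, h8, Ne.symm h8, h9, Ne.symm h9, h10, Ne.symm h10, h11, Ne.symm h11, h12, Ne.symm h12, h13, Ne.symm h13, h14, Ne.symm h14, h15, Ne.symm h15, h16, Ne.symm h16, h17, Ne.symm h17, h18, Ne.symm h18, Ne.symm h19]

-- `query or ""` in B is query.getD ""
lemma pyOrEmpty_eq (q : Option String) : pyOrEmpty q = q.getD "" := by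
  cases q with
  | none => rfl
  | some s => by_cases h : s = "" <;> simp [pyOrEmpty, h]

-- ===== VERDICT (by name: the statement is the Claim_ definition above) =====
theorem detect_command_spec : Claim_equal_detect_command := by
  intro input_command query _
  unfold Spec_detect_command detect_command detect_command_alt
  split_ifs with hmem
  · rfl
  · rw [pyOrEmpty_eq, firstTok_eq, scan_eq_lookup kwScanList _ (by simp [kwScanList]),
      lookup_eq_classify]
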